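-- pv_equiv track=rewrite | github.com/rferrari/llm_chess_arena | chess_arena_with_judge.py | san_to_ascii
-- ===== SOURCE A (Python) =====
-- def san_to_ascii(board_string):
--   piece_map = {
--       "K": "♚",
--       "Q": "♛",
--       "R": "♜",
--       "B": "♝",
--       "N": "♞",
--       "P": "♟",
--       "k": "♔",
--       "q": "♕",
--       "r": "♖",
--       "b": "♗",
--       "n": "♘",
--       "p": "♙"
--   }
--   for piece in piece_map:
--     board_string = board_string.replace(piece, piece_map[piece])
--   return board_string
-- ===== SOURCE B (Python) =====
-- def san_to_ascii(board_string):
--   piece_map = {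
--       "K": "♚",
--       "Q": "♛",
--       "R": "♜",
--       "B": "♝",
--       "N": "♞",
--       "P": "♟",
--       "k": "♔",
--       "q": "♕",
--       "r": "♖",
--       "b": "♗",
--       "n": "♘",
--       "p": "♙"
--   }
--   return "".join(piece_map.get(ch, ch) for ch in board_string)
-- ===== Notes on version B (the rewrite author's own statement) =====
-- stated objective: idiomatic
-- what changed: Replaces twelve sequential whole-string .replace passes with a single pass over the characters joining per-character dict lookups; results agree because no replacement symbol is itself a key.
import Mathlib
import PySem

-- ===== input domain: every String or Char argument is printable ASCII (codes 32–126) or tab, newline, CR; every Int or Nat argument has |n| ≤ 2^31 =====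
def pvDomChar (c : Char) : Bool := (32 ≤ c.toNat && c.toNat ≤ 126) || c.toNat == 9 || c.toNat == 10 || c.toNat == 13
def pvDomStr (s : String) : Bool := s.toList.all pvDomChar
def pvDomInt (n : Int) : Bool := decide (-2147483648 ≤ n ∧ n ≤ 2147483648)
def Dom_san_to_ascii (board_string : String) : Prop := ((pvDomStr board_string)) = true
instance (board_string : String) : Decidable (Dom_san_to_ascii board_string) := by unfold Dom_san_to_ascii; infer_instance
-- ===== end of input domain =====

-- B is a single pass joining per-character dict lookups instead of A's twelve whole-string replace passes (idiomatic; same result).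

-- ===== PORT A =====
-- A's piece_map, as an insertion-ordered dict; A iterates its keys and replaces each.
def sanPieceMapA : PySem.Dict String String :=
  PySem.Dict.mk [("K", "♚"), ("Q", "♛"), ("R", "♜"), ("B", "♝"), ("N", "♞"), ("P", "♟"),
                 ("k", "♔"), ("q", "♕"), ("r", "♖"), ("b", "♗"), ("n", "♘"), ("p", "♙")]

def san_to_ascii (board_string : String) : String :=
  sanPieceMapA.keys.foldl (fun s piece => PySem.Str.replace s piece (sanPieceMapA.getD piece "")) board_string

-- ===== PORT B =====
-- B's piece_map; each key and value is a one-character string, modelled as Char.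
def sanPieceMapB : PySem.Dict Char Char :=
  PySem.Dict.mk [('K', '♚'), ('Q', '♛'), ('R', '♜'), ('B', '♝'), ('N', '♞'), ('P', '♟'),
                 ('k', '♔'), ('q', '♕'), ('r', '♖'), ('b', '♗'), ('n', '♘'), ('p', '♙')]

-- ''.join(piece_map.get(ch, ch) for ch in board_string): one pass, one lookup per character.
def san_to_ascii_alt (board_string : String) : String :=
  String.ofList (board_string.toList.map (fun ch => sanPieceMapB.getD ch ch))

-- ===== PRECONDITION & SPEC =====
def Spec_san_to_ascii (board_string : String) (out : String) : Prop := out = san_to_ascii_alt board_string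
instance (board_string : String) (out : String) : Decidable (Spec_san_to_ascii board_string out) := by unfold Spec_san_to_ascii; infer_instance

-- ===== CLAIM (what is proved, stated in full; the proofs are below) =====
def Claim_equal_san_to_ascii : Prop := ∀ (board_string : String), Dom_san_to_ascii board_string → Spec_san_to_ascii board_string (san_to_ascii board_string)

-- ===== LEMMAS AND PROOFS =====

-- Chars.replace with a one-character pattern and one-character replacement is a character map.
theorem replace_go_single (c y : Char) :
    ∀ (l : List Char) (fuel : Nat) (acc : List Char), l.length ≤ fuel →
      PySem.Chars.replace.go [c] [y] fuel l acc
        = acc.reverse ++ l.map (fun d => if d = c then y else d) := by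
  intro l
  induction l with
  | nil =>
    intro fuel acc _
    cases fuel <;> simp [PySem.Chars.replace.go]
  | cons d t ih =>
    intro fuel acc hlen
    cases fuel with
    | zero => simp at hlen
    | succ f =>
      rw [PySem.Chars.replace.go]
      by_cases hdc : d = c
      · subst hdc
        simp only [List.isPrefixOf, BEq.rfl, Bool.true_and, if_true,
          List.length_cons, List.length_nil, List.drop_succ_cons, List.drop_zero]
        rw [ih _ _ (by simpa using hlen)]
        simp
      · have hp : [c].isPrefixOf (d :: t) = false := by
          simp [List.isPrefixOf]
          exact fun h => (hdc h.symm).elim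
        rw [hp]
        simp only [Bool.false_eq_true, if_false]
        rw [ih _ _ (by simpa using Nat.le_of_succ_le_succ hlen)]
        simp [hdc]

theorem replace_single (c y : Char) (s : List Char) :
    PySem.Chars.replace s [c] [y] = s.map (fun d => if d = c then y else d) := by
  simp only [PySem.Chars.replace, List.isEmpty_cons, Bool.false_eq_true, if_false]
  exact replace_go_single c y s s.length [] le_rfl

-- prefix dicts: pvPrefixMap i holds the first i entries of B's piece_map (stage invariant)
def pvPrefixMap1 : PySem.Dict Char Char := PySem.Dict.mk [('K', '♚')]
def pvPrefixMap2 : PySem.Dict Char Char := PySem.Dict.mk [('K', '♚'), ('Q', '♛')]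
def pvPrefixMap3 : PySem.Dict Char Char := PySem.Dict.mk [('K', '♚'), ('Q', '♛'), ('R', '♜')]
def pvPrefixMap4 : PySem.Dict Char Char := PySem.Dict.mk [('K', '♚'), ('Q', '♛'), ('R', '♜'), ('B', '♝')]
def pvPrefixMap5 : PySem.Dict Char Char := PySem.Dict.mk [('K', '♚'), ('Q', '♛'), ('R', '♜'), ('B', '♝'), ('N', '♞')]
def pvPrefixMap6 : PySem.Dict Char Char := PySem.Dict.mk [('K', '♚'), ('Q', '♛'), ('R', '♜'), ('B', '♝'), ('N', '♞'), ('P', '♟')]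
def pvPrefixMap7 : PySem.Dict Char Char := PySem.Dict.mk [('K', '♚'), ('Q', '♛'), ('R', '♜'), ('B', '♝'), ('N', '♞'), ('P', '♟'), ('k', '♔')]
def pvPrefixMap8 : PySem.Dict Char Char := PySem.Dict.mk [('K', '♚'), ('Q', '♛'), ('R', '♜'), ('B', '♝'), ('N', '♞'), ('P', '♟'), ('k', '♔'), ('q', '♕')]
def pvPrefixMap9 : PySem.Dict Char Char := PySem.Dict.mk [('K', '♚'), ('Q', '♛'), ('R', '♜'), ('B', '♝'), ('N', '♞'), ('P', '♟'), ('k', '♔'), ('q', '♕'), ('r', '♖')]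
def pvPrefixMap10 : PySem.Dict Char Char := PySem.Dict.mk [('K', '♚'), ('Q', '♛'), ('R', '♜'), ('B', '♝'), ('N', '♞'), ('P', '♟'), ('k', '♔'), ('q', '♕'), ('r', '♖'), ('b', '♗')]
def pvPrefixMap11 : PySem.Dict Char Char := PySem.Dict.mk [('K', '♚'), ('Q', '♛'), ('R', '♜'), ('B', '♝'), ('N', '♞'), ('P', '♟'), ('k', '♔'), ('q', '♕'), ('r', '♖'), ('b', '♗'), ('n', '♘')]

-- pointwise: applying A's i-th substitution after the first i-1 lookups equals the first i lookups
theorem pvPw1 (ch : Char) : (fun d => if d = 'K' then '♚' else d) ch = (pvPrefixMap1).getD ch ch := by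
  by_cases h0 : ch = 'K'
  · subst h0; decide
  simp only [pvPrefixMap1, PySem.Dict.getD_eq_get?_getD, PySem.Dict.get?_mk_cons, beq_iff_eq,
    if_neg (Ne.symm h0)]
  simp_all [PySem.Dict.get?]

theorem pvPw2 (ch : Char) :
    (fun d => if d = 'Q' then '♛' else d) ((pvPrefixMap1).getD ch ch) = (pvPrefixMap2).getD ch ch := by
  by_cases h0 : ch = 'K'
  · subst h0; decide
  by_cases h1 : ch = 'Q'
  · subst h1; decide
  simp only [pvPrefixMap1, pvPrefixMap2, PySem.Dict.getD_eq_get?_getD, PySem.Dict.get?_mk_cons, beq_iff_eq,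
    if_neg (Ne.symm h0), if_neg (Ne.symm h1)]
  simp_all [PySem.Dict.get?]

theorem pvPw3 (ch : Char) :
    (fun d => if d = 'R' then '♜' else d) ((pvPrefixMap2).getD ch ch) = (pvPrefixMap3).getD ch ch := by
  by_cases h0 : ch = 'K'
  · subst h0; decide
  by_cases h1 : ch = 'Q'
  · subst h1; decide
  by_cases h2 : ch = 'R'
  · subst h2; decide
  simp only [pvPrefixMap2, pvPrefixMap3, PySem.Dict.getD_eq_get?_getD, PySem.Dict.get?_mk_cons, beq_iff_eq,
    if_neg (Ne.symm h0), if_neg (Ne.symm h1), if_neg (Ne.symm h2)]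
  simp_all [PySem.Dict.get?]

theorem pvPw4 (ch : Char) :
    (fun d => if d = 'B' then '♝' else d) ((pvPrefixMap3).getD ch ch) = (pvPrefixMap4).getD ch ch := by
  by_cases h0 : ch = 'K'
  · subst h0; decide
  by_cases h1 : ch = 'Q'
  · subst h1; decide
  by_cases h2 : ch = 'R'
  · subst h2; decide
  by_cases h3 : ch = 'B'
  · subst h3; decide
  simp only [pvPrefixMap3, pvPrefixMap4, PySem.Dict.getD_eq_get?_getD, PySem.Dict.get?_mk_cons, beq_iff_eq,
    if_neg (Ne.symm h0), if_neg (Ne.symm h1), if_neg (Ne.symm h2), if_neg (Ne.symm h3)]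
  simp_all [PySem.Dict.get?]

theorem pvPw5 (ch : Char) :
    (fun d => if d = 'N' then '♞' else d) ((pvPrefixMap4).getD ch ch) = (pvPrefixMap5).getD ch ch := by
  by_cases h0 : ch = 'K'
  · subst h0; decide
  by_cases h1 : ch = 'Q'
  · subst h1; decide
  by_cases h2 : ch = 'R'
  · subst h2; decide
  by_cases h3 : ch = 'B'
  · subst h3; decide
  by_cases h4 : ch = 'N'
  · subst h4; decide
  simp only [pvPrefixMap4, pvPrefixMap5, PySem.Dict.getD_eq_get?_getD, PySem.Dict.get?_mk_cons, beq_iff_eq,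
    if_neg (Ne.symm h0), if_neg (Ne.symm h1), if_neg (Ne.symm h2), if_neg (Ne.symm h3), if_neg (Ne.symm h4)]
  simp_all [PySem.Dict.get?]

theorem pvPw6 (ch : Char) :
    (fun d => if d = 'P' then '♟' else d) ((pvPrefixMap5).getD ch ch) = (pvPrefixMap6).getD ch ch := by
  by_cases h0 : ch = 'K'
  · subst h0; decide
  by_cases h1 : ch = 'Q'
  · subst h1; decide
  by_cases h2 : ch = 'R'
  · subst h2; decide
  by_cases h3 : ch = 'B'
  · subst h3; decide
  by_cases h4 : ch = 'N'
  · subst h4; decide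
  by_cases h5 : ch = 'P'
  · subst h5; decide
  simp only [pvPrefixMap5, pvPrefixMap6, PySem.Dict.getD_eq_get?_getD, PySem.Dict.get?_mk_cons, beq_iff_eq,
    if_neg (Ne.symm h0), if_neg (Ne.symm h1), if_neg (Ne.symm h2), if_neg (Ne.symm h3), if_neg (Ne.symm h4), if_neg (Ne.symm h5)]
  simp_all [PySem.Dict.get?]

theorem pvPw7 (ch : Char) :
    (fun d => if d = 'k' then '♔' else d) ((pvPrefixMap6).getD ch ch) = (pvPrefixMap7).getD ch ch := by
  by_cases h0 : ch = 'K'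
  · subst h0; decide
  by_cases h1 : ch = 'Q'
  · subst h1; decide
  by_cases h2 : ch = 'R'
  · subst h2; decide
  by_cases h3 : ch = 'B'
  · subst h3; decide
  by_cases h4 : ch = 'N'
  · subst h4; decide
  by_cases h5 : ch = 'P'
  · subst h5; decide
  by_cases h6 : ch = 'k'
  · subst h6; decide
  simp only [pvPrefixMap6, pvPrefixMap7, PySem.Dict.getD_eq_get?_getD, PySem.Dict.get?_mk_cons, beq_iff_eq,
    if_neg (Ne.symm h0), if_neg (Ne.symm h1), if_neg (Ne.symm h2), if_neg (Ne.symm h3), if_neg (Ne.symm h4), if_neg (Ne.symm h5), if_neg (Ne.symm h6)]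
  simp_all [PySem.Dict.get?]

theorem pvPw8 (ch : Char) :
    (fun d => if d = 'q' then '♕' else d) ((pvPrefixMap7).getD ch ch) = (pvPrefixMap8).getD ch ch := by
  by_cases h0 : ch = 'K'
  · subst h0; decide
  by_cases h1 : ch = 'Q'
  · subst h1; decide
  by_cases h2 : ch = 'R'
  · subst h2; decide
  by_cases h3 : ch = 'B'
  · subst h3; decide
  by_cases h4 : ch = 'N'
  · subst h4; decide
  by_cases h5 : ch = 'P'
  · subst h5; decide
  by_cases h6 : ch = 'k'
  · subst h6; decide
  by_cases h7 : ch = 'q'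
  · subst h7; decide
  simp only [pvPrefixMap7, pvPrefixMap8, PySem.Dict.getD_eq_get?_getD, PySem.Dict.get?_mk_cons, beq_iff_eq,
    if_neg (Ne.symm h0), if_neg (Ne.symm h1), if_neg (Ne.symm h2), if_neg (Ne.symm h3), if_neg (Ne.symm h4), if_neg (Ne.symm h5), if_neg (Ne.symm h6), if_neg (Ne.symm h7)]
  simp_all [PySem.Dict.get?]

theorem pvPw9 (ch : Char) :
    (fun d => if d = 'r' then '♖' else d) ((pvPrefixMap8).getD ch ch) = (pvPrefixMap9).getD ch ch := by
  by_cases h0 : ch = 'K'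
  · subst h0; decide
  by_cases h1 : ch = 'Q'
  · subst h1; decide
  by_cases h2 : ch = 'R'
  · subst h2; decide
  by_cases h3 : ch = 'B'
  · subst h3; decide
  by_cases h4 : ch = 'N'
  · subst h4; decide
  by_cases h5 : ch = 'P'
  · subst h5; decide
  by_cases h6 : ch = 'k'
  · subst h6; decide
  by_cases h7 : ch = 'q'
  · subst h7; decide
  by_cases h8 : ch = 'r'
  · subst h8; decide
  simp only [pvPrefixMap8, pvPrefixMap9, PySem.Dict.getD_eq_get?_getD, PySem.Dict.get?_mk_cons, beq_iff_eq,
    if_neg (Ne.symm h0), if_neg (Ne.symm h1), if_neg (Ne.symm h2), if_neg (Ne.symm h3), if_neg (Ne.symm h4), if_neg (Ne.symm h5), if_neg (Ne.symm h6), if_neg (Ne.symm h7), if_neg (Ne.symm h8)]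
  simp_all [PySem.Dict.get?]

theorem pvPw10 (ch : Char) :
    (fun d => if d = 'b' then '♗' else d) ((pvPrefixMap9).getD ch ch) = (pvPrefixMap10).getD ch ch := by
  by_cases h0 : ch = 'K'
  · subst h0; decide
  by_cases h1 : ch = 'Q'
  · subst h1; decide
  by_cases h2 : ch = 'R'
  · subst h2; decide
  by_cases h3 : ch = 'B'
  · subst h3; decide
  by_cases h4 : ch = 'N'
  · subst h4; decide
  by_cases h5 : ch = 'P'
  · subst h5; decide
  by_cases h6 : ch = 'k'
  · subst h6; decide
  by_cases h7 : ch = 'q'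
  · subst h7; decide
  by_cases h8 : ch = 'r'
  · subst h8; decide
  by_cases h9 : ch = 'b'
  · subst h9; decide
  simp only [pvPrefixMap9, pvPrefixMap10, PySem.Dict.getD_eq_get?_getD, PySem.Dict.get?_mk_cons, beq_iff_eq,
    if_neg (Ne.symm h0), if_neg (Ne.symm h1), if_neg (Ne.symm h2), if_neg (Ne.symm h3), if_neg (Ne.symm h4), if_neg (Ne.symm h5), if_neg (Ne.symm h6), if_neg (Ne.symm h7), if_neg (Ne.symm h8), if_neg (Ne.symm h9)]
  simp_all [PySem.Dict.get?]

theorem pvPw11 (ch : Char) :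
    (fun d => if d = 'n' then '♘' else d) ((pvPrefixMap10).getD ch ch) = (pvPrefixMap11).getD ch ch := by
  by_cases h0 : ch = 'K'
  · subst h0; decide
  by_cases h1 : ch = 'Q'
  · subst h1; decide
  by_cases h2 : ch = 'R'
  · subst h2; decide
  by_cases h3 : ch = 'B'
  · subst h3; decide
  by_cases h4 : ch = 'N'
  · subst h4; decide
  by_cases h5 : ch = 'P'
  · subst h5; decide
  by_cases h6 : ch = 'k'
  · subst h6; decide
  by_cases h7 : ch = 'q'
  · subst h7; decide
  by_cases h8 : ch = 'r'
  · subst h8; decide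
  by_cases h9 : ch = 'b'
  · subst h9; decide
  by_cases h10 : ch = 'n'
  · subst h10; decide
  simp only [pvPrefixMap10, pvPrefixMap11, PySem.Dict.getD_eq_get?_getD, PySem.Dict.get?_mk_cons, beq_iff_eq,
    if_neg (Ne.symm h0), if_neg (Ne.symm h1), if_neg (Ne.symm h2), if_neg (Ne.symm h3), if_neg (Ne.symm h4), if_neg (Ne.symm h5), if_neg (Ne.symm h6), if_neg (Ne.symm h7), if_neg (Ne.symm h8), if_neg (Ne.symm h9), if_neg (Ne.symm h10)]
  simp_all [PySem.Dict.get?]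

theorem pvPw12 (ch : Char) :
    (fun d => if d = 'p' then '♙' else d) ((pvPrefixMap11).getD ch ch) = (sanPieceMapB).getD ch ch := by
  by_cases h0 : ch = 'K'
  · subst h0; decide
  by_cases h1 : ch = 'Q'
  · subst h1; decide
  by_cases h2 : ch = 'R'
  · subst h2; decide
  by_cases h3 : ch = 'B'
  · subst h3; decide
  by_cases h4 : ch = 'N'
  · subst h4; decide
  by_cases h5 : ch = 'P'
  · subst h5; decide
  by_cases h6 : ch = 'k'
  · subst h6; decide
  by_cases h7 : ch = 'q'
  · subst h7; decide
  by_cases h8 : ch = 'r'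
  · subst h8; decide
  by_cases h9 : ch = 'b'
  · subst h9; decide
  by_cases h10 : ch = 'n'
  · subst h10; decide
  by_cases h11 : ch = 'p'
  · subst h11; decide
  simp only [pvPrefixMap11, sanPieceMapB, PySem.Dict.getD_eq_get?_getD, PySem.Dict.get?_mk_cons, beq_iff_eq,
    if_neg (Ne.symm h0), if_neg (Ne.symm h1), if_neg (Ne.symm h2), if_neg (Ne.symm h3), if_neg (Ne.symm h4), if_neg (Ne.symm h5), if_neg (Ne.symm h6), if_neg (Ne.symm h7), if_neg (Ne.symm h8), if_neg (Ne.symm h9), if_neg (Ne.symm h10), if_neg (Ne.symm h11)]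
  simp_all [PySem.Dict.get?]

-- stage lemmas: one replace pass folds into the growing dict lookup
theorem pvStage1 (l : List Char) : l.map (fun d => if d = 'K' then '♚' else d) = l.map (fun ch => (pvPrefixMap1).getD ch ch) :=
  List.map_congr_left (fun ch _ => pvPw1 ch)

theorem pvStage2 (l : List Char) : (l.map (fun ch => (pvPrefixMap1).getD ch ch)).map (fun d => if d = 'Q' then '♛' else d) = l.map (fun ch => (pvPrefixMap2).getD ch ch) := by
  rw [List.map_map]
  exact List.map_congr_left (fun ch _ => pvPw2 ch)

theorem pvStage3 (l : List Char) : (l.map (fun ch => (pvPrefixMap2).getD ch ch)).map (fun d => if d = 'R' then '♜' else d) = l.map (fun ch => (pvPrefixMap3).getD ch ch) := by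
  rw [List.map_map]
  exact List.map_congr_left (fun ch _ => pvPw3 ch)

theorem pvStage4 (l : List Char) : (l.map (fun ch => (pvPrefixMap3).getD ch ch)).map (fun d => if d = 'B' then '♝' else d) = l.map (fun ch => (pvPrefixMap4).getD ch ch) := by
  rw [List.map_map]
  exact List.map_congr_left (fun ch _ => pvPw4 ch)

theorem pvStage5 (l : List Char) : (l.map (fun ch => (pvPrefixMap4).getD ch ch)).map (fun d => if d = 'N' then '♞' else d) = l.map (fun ch => (pvPrefixMap5).getD ch ch) := by
  rw [List.map_map]
  exact List.map_congr_left (fun ch _ => pvPw5 ch)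

theorem pvStage6 (l : List Char) : (l.map (fun ch => (pvPrefixMap5).getD ch ch)).map (fun d => if d = 'P' then '♟' else d) = l.map (fun ch => (pvPrefixMap6).getD ch ch) := by
  rw [List.map_map]
  exact List.map_congr_left (fun ch _ => pvPw6 ch)

theorem pvStage7 (l : List Char) : (l.map (fun ch => (pvPrefixMap6).getD ch ch)).map (fun d => if d = 'k' then '♔' else d) = l.map (fun ch => (pvPrefixMap7).getD ch ch) := by
  rw [List.map_map]
  exact List.map_congr_left (fun ch _ => pvPw7 ch)

theorem pvStage8 (l : List Char) : (l.map (fun ch => (pvPrefixMap7).getD ch ch)).map (fun d => if d = 'q' then '♕' else d) = l.map (fun ch => (pvPrefixMap8).getD ch ch) := by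
  rw [List.map_map]
  exact List.map_congr_left (fun ch _ => pvPw8 ch)

theorem pvStage9 (l : List Char) : (l.map (fun ch => (pvPrefixMap8).getD ch ch)).map (fun d => if d = 'r' then '♖' else d) = l.map (fun ch => (pvPrefixMap9).getD ch ch) := by
  rw [List.map_map]
  exact List.map_congr_left (fun ch _ => pvPw9 ch)

theorem pvStage10 (l : List Char) : (l.map (fun ch => (pvPrefixMap9).getD ch ch)).map (fun d => if d = 'b' then '♗' else d) = l.map (fun ch => (pvPrefixMap10).getD ch ch) := by
  rw [List.map_map]
  exact List.map_congr_left (fun ch _ => pvPw10 ch)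

theorem pvStage11 (l : List Char) : (l.map (fun ch => (pvPrefixMap10).getD ch ch)).map (fun d => if d = 'n' then '♘' else d) = l.map (fun ch => (pvPrefixMap11).getD ch ch) := by
  rw [List.map_map]
  exact List.map_congr_left (fun ch _ => pvPw11 ch)

theorem pvStage12 (l : List Char) : (l.map (fun ch => (pvPrefixMap11).getD ch ch)).map (fun d => if d = 'p' then '♙' else d) = l.map (fun ch => (sanPieceMapB).getD ch ch) := by
  rw [List.map_map]
  exact List.map_congr_left (fun ch _ => pvPw12 ch)

-- ===== VERDICT (by name: the statement is the Claim_ definition above) =====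
theorem san_to_ascii_spec : Claim_equal_san_to_ascii := by
  intro bs _
  unfold Spec_san_to_ascii san_to_ascii san_to_ascii_alt
  have hkeys : sanPieceMapA.keys
      = ["K","Q","R","B","N","P","k","q","r","b","n","p"] := by decide
  rw [hkeys]
  simp only [List.foldl]
  have hv0 : sanPieceMapA.getD "K" "" = "♚" := by decide
  have hv1 : sanPieceMapA.getD "Q" "" = "♛" := by decide
  have hv2 : sanPieceMapA.getD "R" "" = "♜" := by decide
  have hv3 : sanPieceMapA.getD "B" "" = "♝" := by decide
  have hv4 : sanPieceMapA.getD "N" "" = "♞" := by decide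
  have hv5 : sanPieceMapA.getD "P" "" = "♟" := by decide
  have hv6 : sanPieceMapA.getD "k" "" = "♔" := by decide
  have hv7 : sanPieceMapA.getD "q" "" = "♕" := by decide
  have hv8 : sanPieceMapA.getD "r" "" = "♖" := by decide
  have hv9 : sanPieceMapA.getD "b" "" = "♗" := by decide
  have hv10 : sanPieceMapA.getD "n" "" = "♘" := by decide
  have hv11 : sanPieceMapA.getD "p" "" = "♙" := by decide
  rw [hv0, hv1, hv2, hv3, hv4, hv5, hv6, hv7, hv8, hv9, hv10, hv11]
  have htk0 : ("K" : String).toList = ['K'] := by decide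
  have htv0 : ("♚" : String).toList = ['♚'] := by decide
  have htk1 : ("Q" : String).toList = ['Q'] := by decide
  have htv1 : ("♛" : String).toList = ['♛'] := by decide
  have htk2 : ("R" : String).toList = ['R'] := by decide
  have htv2 : ("♜" : String).toList = ['♜'] := by decide
  have htk3 : ("B" : String).toList = ['B'] := by decide
  have htv3 : ("♝" : String).toList = ['♝'] := by decide
  have htk4 : ("N" : String).toList = ['N'] := by decide
  have htv4 : ("♞" : String).toList = ['♞'] := by decide
  have htk5 : ("P" : String).toList = ['P'] := by decide
  have htv5 : ("♟" : String).toList = ['♟'] := by decide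
  have htk6 : ("k" : String).toList = ['k'] := by decide
  have htv6 : ("♔" : String).toList = ['♔'] := by decide
  have htk7 : ("q" : String).toList = ['q'] := by decide
  have htv7 : ("♕" : String).toList = ['♕'] := by decide
  have htk8 : ("r" : String).toList = ['r'] := by decide
  have htv8 : ("♖" : String).toList = ['♖'] := by decide
  have htk9 : ("b" : String).toList = ['b'] := by decide
  have htv9 : ("♗" : String).toList = ['♗'] := by decide
  have htk10 : ("n" : String).toList = ['n'] := by decide
  have htv10 : ("♘" : String).toList = ['♘'] := by decide
  have htk11 : ("p" : String).toList = ['p'] := by decide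
  have htv11 : ("♙" : String).toList = ['♙'] := by decide
  simp only [PySem.Str.replace, String.toList_ofList, htk0, htv0, htk1, htv1, htk2, htv2, htk3, htv3, htk4, htv4, htk5, htv5, htk6, htv6, htk7, htv7, htk8, htv8, htk9, htv9, htk10, htv10, htk11, htv11]
  refine congrArg String.ofList ?_
  simp only [replace_single]
  rw [pvStage1, pvStage2, pvStage3, pvStage4, pvStage5, pvStage6, pvStage7, pvStage8, pvStage9, pvStage10, pvStage11, pvStage12]
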